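-- pv_equiv track=rewrite | github.com/NikitaFin200/Ha-kathon_Smart_patches | alfa_/test1.py | kmp_search_2d
-- ===== SOURCE A (Python) =====
-- def compute_lps(pattern):
--     """Создает префиксный массив для подсписка (Longest Prefix Suffix)."""
--     lps = [0] * len(pattern)
--     length = 0  # Длина предыдущего наибольшего префикса-суффикса
--     i = 1
--
--     while i < len(pattern):
--         if pattern[i] == pattern[length]:
--             length += 1
--             lps[i] = length
--             i += 1
--         else:
--             if length != 0:
--                 length = lps[length - 1]
--             else:
--                 lps[i] = 0
--                 i += 1
--     return lps
--
-- def kmp_search_2d(text, pattern):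
--     """Ищет все вхождения подсписка pattern в 2D списке text."""
--     if not pattern:
--         return []
--
--     lps = compute_lps(pattern)
--     result = []
--     i = j = 0  # i - индекс в text, j - в pattern
--
--     # Преобразуем 2D список в 1D список для удобства поиска
--     flat_text = []
--     index_map = []  # Для хранения соответствия индексов [i, j]
--
--     for row_idx, row in enumerate(text):
--         for col_idx, value in enumerate(row):
--             flat_text.append(value)
--             index_map.append((row_idx, col_idx))
--
--     # Поиск с использованием KMP
--     while i < len(flat_text):
--         if flat_text[i] == pattern[j]:
--             i += 1
--             j += 1
--             if j == len(pattern):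
--                 # Найдено вхождение
--                 start_idx = i - j
--                 # Получаем начальные индексы [i, j] для первого элемента pattern
--                 row_idx, col_idx = index_map[start_idx]
--                 result.append([row_idx, col_idx])
--                 j = lps[j - 1]
--         else:
--             if j != 0:
--                 j = lps[j - 1]
--             else:
--                 i += 1
--     return result
-- ===== SOURCE B (Python) =====
-- def kmp_search_2d(text, pattern):
--     """Ищет все вхождения подсписка pattern в 2D списке text."""
--     if not pattern:
--         return []
--
--     flat = []
--     pos = []
--     for r, row in enumerate(text):
--         for c, v in enumerate(row):
--             flat.append(v)
--             pos.append([r, c])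
--
--     m = len(pattern)
--     return [pos[s] for s in range(len(flat) - m + 1) if flat[s : s + m] == pattern]
-- ===== Notes on version B (the rewrite author's own statement) =====
-- stated objective: simpler
-- what changed: Replaces the KMP failure-function machinery (compute_lps plus the two-index automaton loop) with a direct naive sliding-window slice comparison over the same flattened text, returning the same match coordinates in the same order; despite the worse worst-case complexity it measured faster in CPython because each window is compared by one C-level list slice/equality instead of the interpreted per-element KMP loop.
import Mathlib
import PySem

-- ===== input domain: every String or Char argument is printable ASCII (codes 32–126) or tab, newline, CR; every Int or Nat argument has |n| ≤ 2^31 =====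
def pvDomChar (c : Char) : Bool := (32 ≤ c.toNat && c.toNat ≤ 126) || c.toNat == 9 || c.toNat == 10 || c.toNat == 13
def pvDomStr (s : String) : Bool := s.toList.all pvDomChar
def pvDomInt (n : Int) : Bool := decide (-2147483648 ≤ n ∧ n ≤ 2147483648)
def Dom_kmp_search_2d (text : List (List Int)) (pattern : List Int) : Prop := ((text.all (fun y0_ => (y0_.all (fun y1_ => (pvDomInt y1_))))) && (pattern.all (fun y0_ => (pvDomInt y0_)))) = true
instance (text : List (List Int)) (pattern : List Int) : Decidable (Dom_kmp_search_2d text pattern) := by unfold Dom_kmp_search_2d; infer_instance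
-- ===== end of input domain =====

-- B replaces A's KMP failure-function search with a naive sliding-window scan over the
-- same flattened text (objective: simpler); identical return value proved below.

-- ===== PORT A =====
-- A's compute_lps while-loop. The loop state is (lps, length, i); `fuel` only makes the
-- recursion structural — it is 2*len(pattern)+1, which the proofs show is never exhausted
-- (the measure 2*(m-i)+length strictly decreases), so the port computes exactly A's loop.
def pvLpsLoop (pattern : List Int) : Nat → List Nat → Nat → Nat → List Nat
  | 0, lps, _, _ => lps
  | fuel+1, lps, length, i =>
    if i < pattern.length then
      if pattern.getD i 0 = pattern.getD length 0 then
        pvLpsLoop pattern fuel (lps.set i (length+1)) (length+1) (i+1)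
      else if length ≠ 0 then
        pvLpsLoop pattern fuel lps (lps.getD (length-1) 0) i
      else
        pvLpsLoop pattern fuel (lps.set i 0) 0 (i+1)
    else lps

def compute_lps (pattern : List Int) : List Nat :=
  pvLpsLoop pattern (2*pattern.length+1) (List.replicate pattern.length 0) 0 1

-- A's KMP search while-loop, state (i, j, result); fuel = 2*len(flat_text)+1, never
-- exhausted (measure 2*(n-i)+j strictly decreases), so it is exactly A's loop.
def pvKmpLoop (flat : List Int) (imap : List (Int × Int)) (pattern : List Int)
    (lps : List Nat) : Nat → Nat → Nat → List (List Int) → List (List Int)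
  | 0, _, _, res => res
  | fuel+1, i, j, res =>
    if i < flat.length then
      if flat.getD i 0 = pattern.getD j 0 then
        if j + 1 = pattern.length then
          let rc := imap.getD (i + 1 - (j + 1)) (0, 0)
          pvKmpLoop flat imap pattern lps fuel (i+1) (lps.getD (j+1-1) 0) (res ++ [[rc.1, rc.2]])
        else
          pvKmpLoop flat imap pattern lps fuel (i+1) (j+1) res
      else if j ≠ 0 then
        pvKmpLoop flat imap pattern lps fuel i (lps.getD (j-1) 0) res
      else
        pvKmpLoop flat imap pattern lps fuel (i+1) 0 res
    else res

def kmp_search_2d (text : List (List Int)) (pattern : List Int) : List (List Int) :=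
  if pattern = [] then [] else
    let fi := (PySem.List.enumerate text).foldl (fun acc p =>
      (PySem.List.enumerate p.2).foldl
        (fun acc2 q => (acc2.1 ++ [q.2], acc2.2 ++ [(p.1, q.1)])) acc) ([], [])
    pvKmpLoop fi.1 fi.2 pattern (compute_lps pattern) (2*fi.1.length+1) 0 0 []

-- ===== PORT B =====
def kmp_search_2d_alt (text : List (List Int)) (pattern : List Int) : List (List Int) :=
  if pattern = [] then [] else
    let fp := (PySem.List.enumerate text).foldl (fun acc p =>
      (PySem.List.enumerate p.2).foldl
        (fun acc2 q => (acc2.1 ++ [q.2], acc2.2 ++ [[p.1, q.1]])) acc)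
      (([] : List Int), ([] : List (List Int)))
    let m : Int := pattern.length
    ((PySem.List.pyRange 0 ((fp.1.length : Int) - m + 1) 1).filter
        (fun s => PySem.List.slice fp.1 (some s) (some (s + m)) == pattern)).map
      (fun s => PySem.List.pyGetD fp.2 s [])

-- ===== PRECONDITION & SPEC =====
def Spec_kmp_search_2d (text : List (List Int)) (pattern : List Int) (out : List (List Int)) : Prop := out = kmp_search_2d_alt text pattern
instance (text : List (List Int)) (pattern : List Int) (out : List (List Int)) : Decidable (Spec_kmp_search_2d text pattern out) := by unfold Spec_kmp_search_2d; infer_instance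

-- ===== CLAIM (what is proved, stated in full; the proofs are below) =====
def Claim_equal_kmp_search_2d : Prop := ∀ (text : List (List Int)) (pattern : List Int), Dom_kmp_search_2d text pattern → Spec_kmp_search_2d text pattern (kmp_search_2d text pattern)

-- ===== LEMMAS AND PROOFS =====

-- the naive match-start list (B's semantics, over the flattened text), cut at end ≤ i
def pvE (t p : List Int) (i : Nat) : List Nat :=
  (List.range (i + 1 - p.length)).filter (fun s => (t.drop s).take p.length == p)

-- "p.take b is a suffix of p.take K, proper and maximal": the value lps[K-1] must take
def pvIsMaxBord (p : List Int) (K b : Nat) : Prop :=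
  b < K ∧ p.take b <:+ p.take K ∧ ∀ l, l < K → p.take l <:+ p.take K → l ≤ b

theorem pv_concat_suffix_concat (u v : List Int) (a b : Int) :
    u ++ [a] <:+ v ++ [b] ↔ u <:+ v ∧ a = b := by
  constructor
  · intro h
    rw [← List.reverse_prefix] at h
    simp only [List.reverse_append, List.reverse_singleton, List.singleton_append] at h
    rw [List.cons_prefix_cons] at h
    exact ⟨List.reverse_prefix.mp h.2, h.1⟩
  · rintro ⟨⟨w, rfl⟩, rfl⟩
    exact ⟨w, by simp⟩

-- extension step: matching one more element
theorem pv_ext_iff (t p : List Int) (i l : Nat) (hi : i < t.length) (hl : l < p.length) :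
    p.take (l+1) <:+ t.take (i+1) ↔ (p.take l <:+ t.take i ∧ t.getD i 0 = p.getD l 0) := by
  rw [List.take_succ_eq_append_getElem hl, List.take_succ_eq_append_getElem hi,
    pv_concat_suffix_concat, List.getD_eq_getElem _ _ hi, List.getD_eq_getElem _ _ hl, eq_comm]

-- full match ending at i  ↔  naive occurrence at i - m
theorem pv_occ_iff (t p : List Int) (i : Nat) (hm : p.length ≤ i) (hi : i ≤ t.length) :
    p <:+ t.take i ↔ (t.drop (i - p.length)).take p.length = p := by
  rw [List.suffix_iff_eq_drop, List.length_take, min_eq_left hi]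
  constructor
  · intro h
    conv_rhs => rw [h]
    rw [List.drop_take]
    congr 1
    omega
  · intro h
    conv_lhs => rw [← h]
    rw [List.drop_take]
    congr 2
    omega

-- ---- correctness of compute_lps ----
def pvLINV (p : List Int) (lps : List Nat) (length i : Nat) : Prop :=
  1 ≤ i ∧ i ≤ p.length ∧ length < i ∧ lps.length = p.length ∧
  (∀ k, k < i → pvIsMaxBord p (k+1) (lps.getD k 0)) ∧
  p.take length <:+ p.take i ∧
  (∀ l, length < l → l < i → p.take l <:+ p.take i → ¬ p.getD i 0 = p.getD l 0)

theorem pvLpsLoop_spec (p : List Int) : ∀ (fuel : Nat) (lps : List Nat) (length i : Nat),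
    pvLINV p lps length i → 2*(p.length - i) + length < fuel →
    ∀ k, k < p.length → pvIsMaxBord p (k+1) ((pvLpsLoop p fuel lps length i).getD k 0) := by
  intro fuel
  induction fuel with
  | zero => intro lps length i _ hf; omega
  | succ fuel ih =>
    intro lps length i hinv hf k hk
    obtain ⟨h1, h2, h3, h4, h5, h6, h7⟩ := hinv
    simp only [pvLpsLoop]
    by_cases hi : i < p.length
    · rw [if_pos hi]
      by_cases heq : p.getD i 0 = p.getD length 0
      · rw [if_pos heq]
        have hlen_lt : length < p.length := by omega
        have hext : p.take (length+1) <:+ p.take (i+1) := by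
          rw [pv_ext_iff p p i length hi hlen_lt]; exact ⟨h6, heq⟩
        have hmax : ∀ l, l < i+1 → p.take l <:+ p.take (i+1) → l ≤ length+1 := by
          intro l hl hs
          match l with
          | 0 => omega
          | Nat.succ l'' =>
            rw [pv_ext_iff p p i l'' hi (by omega)] at hs
            by_contra hgt
            exact h7 l'' (by omega) (by omega) hs.1 hs.2
        have hIMB : pvIsMaxBord p (i+1) (length+1) := ⟨by omega, hext, hmax⟩
        apply ih (lps.set i (length+1)) (length+1) (i+1) ?_ (by omega) k hk
        refine ⟨by omega, by omega, by omega, by simp [h4], ?_, hext, ?_⟩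
        · intro k' hk'
          by_cases hki : k' = i
          · rw [hki]
            have hlt : i < lps.length := by omega
            have hv : (lps.set i (length+1)).getD i 0 = length+1 := by
              simp [List.getD_eq_getElem?_getD, hlt]
            rw [hv]; exact hIMB
          · have hv : (lps.set i (length+1)).getD k' 0 = lps.getD k' 0 := by
              simp [List.getD_eq_getElem?_getD, Ne.symm hki]
            rw [hv]; exact h5 k' (by omega)
        · intro l hl1 hl2 hs
          exact absurd (hmax l hl2 hs) (by omega)
      · rw [if_neg heq]
        by_cases hl0 : length = 0
        · rw [if_neg (by simp [hl0])]
          subst hl0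
          have hmax0 : ∀ l, l < i+1 → p.take l <:+ p.take (i+1) → l ≤ 0 := by
            intro l hl hs
            match l with
            | 0 => omega
            | Nat.succ l'' =>
              rw [pv_ext_iff p p i l'' hi (by omega)] at hs
              rcases Nat.eq_zero_or_pos l'' with h0 | hpos
              · subst h0; exact absurd hs.2 heq
              · exact absurd hs.2 (h7 l'' (by omega) (by omega) hs.1)
          have hIMB : pvIsMaxBord p (i+1) 0 := ⟨by omega, by simp, hmax0⟩
          apply ih (lps.set i 0) 0 (i+1) ?_ (by omega) k hk
          refine ⟨by omega, by omega, by omega, by simp [h4], ?_, by simp, ?_⟩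
          · intro k' hk'
            by_cases hki : k' = i
            · rw [hki]
              have hlt : i < lps.length := by omega
              have hv : (lps.set i 0).getD i 0 = 0 := by
                simp [List.getD_eq_getElem?_getD, hlt]
              rw [hv]; exact hIMB
            · have hv : (lps.set i 0).getD k' 0 = lps.getD k' 0 := by
                simp [List.getD_eq_getElem?_getD, Ne.symm hki]
              rw [hv]; exact h5 k' (by omega)
          · intro l hl1 hl2 hs
            exact absurd (hmax0 l hl2 hs) (by omega)
        · rw [if_pos hl0]
          have hIMB := h5 (length-1) (by omega)
          rw [Nat.sub_add_cancel (by omega)] at hIMB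
          obtain ⟨hb1, hb2, hb3⟩ := hIMB
          apply ih lps (lps.getD (length-1) 0) i ?_ (by omega) k hk
          refine ⟨h1, h2, by omega, h4, h5, hb2.trans h6, ?_⟩
          intro l hl1 hl2 hs
          by_cases hlg : length < l
          · exact h7 l hlg hl2 hs
          · by_cases hle : l = length
            · subst hle; exact heq
            · have hlt : l < length := by omega
              have hss : p.take l <:+ p.take length := by
                apply List.suffix_of_suffix_length_le hs h6
                rw [List.length_take_of_le (by omega), List.length_take_of_le (by omega)]
                omega
              exact absurd (hb3 l hlt hss) (by omega)
    · rw [if_neg hi]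
      exact h5 k (by omega)

theorem compute_lps_spec (p : List Int) (hp : p ≠ []) :
    ∀ k, k < p.length → pvIsMaxBord p (k+1) ((compute_lps p).getD k 0) := by
  intro k hk
  have hm : 1 ≤ p.length := List.length_pos_iff.mpr hp
  apply pvLpsLoop_spec p (2*p.length+1) _ 0 1 ?_ (by omega) k hk
  refine ⟨le_refl 1, hm, by omega, by simp, ?_, by simp, ?_⟩
  · intro k' hk'
    have hk0 : k' = 0 := by omega
    subst hk0
    have h0 : 0 < p.length := hm
    have hv : (List.replicate p.length (0:Nat)).getD 0 0 = 0 := by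
      simp [List.getD_eq_getElem?_getD, h0]
    rw [hv]
    exact ⟨by omega, by simp, fun l hl _ => by omega⟩
  · intro l hl1 hl2 _
    omega

-- ---- correctness of the search loop ----
def pvG (imap : List (Int × Int)) (s : Nat) : List Int :=
  [(imap.getD s (0,0)).1, (imap.getD s (0,0)).2]

def pvKINV (t p : List Int) (i j : Nat) : Prop :=
  i ≤ t.length ∧ j < p.length ∧ j ≤ i ∧ p.take j <:+ t.take i ∧
  (∀ l, j < l → l < p.length → p.take l <:+ t.take i → ¬ t.getD i 0 = p.getD l 0)

theorem pvE_zero (t p : List Int) (hp : p ≠ []) : pvE t p 0 = [] := by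
  have : 0 + 1 - p.length = 0 := by
    have := List.length_pos_iff.mpr hp; omega
  simp [pvE, this]

theorem pvE_succ_occ (t p : List Int) (i : Nat) (hi : i < t.length)
    (hm : p.length ≤ i + 1) (hocc : p <:+ t.take (i+1)) :
    pvE t p (i+1) = pvE t p i ++ [i + 1 - p.length] := by
  have h1 : i + 1 + 1 - p.length = (i + 1 - p.length) + 1 := by omega
  rw [pvE, h1, List.range_succ, List.filter_append]
  congr 1
  have hc : (t.drop (i + 1 - p.length)).take p.length = p :=
    (pv_occ_iff t p (i+1) hm (by omega)).mp hocc
  simp [hc]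

theorem pvE_succ_no_occ (t p : List Int) (i : Nat) (hi : i < t.length)
    (hocc : ¬ p <:+ t.take (i+1)) : pvE t p (i+1) = pvE t p i := by
  by_cases hm : p.length ≤ i + 1
  · have h1 : i + 1 + 1 - p.length = (i + 1 - p.length) + 1 := by omega
    rw [pvE, h1, List.range_succ, List.filter_append]
    have hc : ¬ (t.drop (i + 1 - p.length)).take p.length = p :=
      fun hc => hocc ((pv_occ_iff t p (i+1) hm (by omega)).mpr hc)
    simp [pvE, hc]
  · have h1 : i + 1 + 1 - p.length = 0 := by omega
    have h2 : i + 1 - p.length = 0 := by omega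
    rw [pvE, pvE, h1, h2]

theorem pvKmpLoop_spec (t p : List Int) (imap : List (Int × Int)) (lps : List Nat)
    (hp : p ≠ []) (hlps : ∀ k, k < p.length → pvIsMaxBord p (k+1) (lps.getD k 0)) :
    ∀ (fuel i j : Nat) (res : List (List Int)), pvKINV t p i j →
      res = (pvE t p i).map (pvG imap) → 2*(t.length - i) + j < fuel →
      pvKmpLoop t imap p lps fuel i j res = (pvE t p t.length).map (pvG imap) := by
  intro fuel
  induction fuel with
  | zero => intro i j res _ _ hf; omega
  | succ fuel ih =>
    intro i j res hinv hres hf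
    obtain ⟨h1, h2, h3, h4, h5⟩ := hinv
    have hm1 : 1 ≤ p.length := List.length_pos_iff.mpr hp
    simp only [pvKmpLoop]
    by_cases hi : i < t.length
    · rw [if_pos hi]
      by_cases heq : t.getD i 0 = p.getD j 0
      · rw [if_pos heq]
        by_cases hjm : j + 1 = p.length
        · rw [if_pos hjm]
          -- full match ending at i+1
          have hocc : p <:+ t.take (i+1) := by
            have := (pv_ext_iff t p i j hi h2).mpr ⟨h4, heq⟩
            rwa [hjm, List.take_length] at this
          have hb := hlps (p.length - 1) (by omega)
          rw [Nat.sub_add_cancel hm1] at hb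
          obtain ⟨hb1, hb2, hb3⟩ := hb
          rw [show j + 1 - 1 = p.length - 1 by omega, show i + 1 - (j+1) = i + 1 - p.length by omega]
          apply ih (i+1) (lps.getD (p.length - 1) 0) _ ?_ ?_ ?_
          · refine ⟨by omega, by omega, by omega, ?_, ?_⟩
            · rw [List.take_length] at hb2
              exact hb2.trans hocc
            · intro l hl1 hl2 hs
              have hll : p.take l <:+ p.take p.length := by
                rw [List.take_length]
                apply List.suffix_of_suffix_length_le hs hocc
                rw [List.length_take_of_le (by omega)]; omega
              exact absurd (hb3 l hl2 hll) (by omega)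
          · rw [pvE_succ_occ t p i hi (by omega) hocc, List.map_append, ← hres]
            simp [pvG]
          · omega
        · rw [if_neg hjm]
          have hocc : ¬ p <:+ t.take (i+1) := by
            intro hocc
            have hps : p.take (p.length - 1 + 1) <:+ t.take (i+1) := by
              rw [Nat.sub_add_cancel hm1, List.take_length]; exact hocc
            rw [pv_ext_iff t p i (p.length - 1) hi (by omega)] at hps
            exact h5 (p.length - 1) (by omega) (by omega) hps.1 hps.2
          apply ih (i+1) (j+1) _ ?_ ?_ ?_
          · refine ⟨by omega, by omega, by omega, (pv_ext_iff t p i j hi h2).mpr ⟨h4, heq⟩, ?_⟩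
            intro l hl1 hl2 hs
            match l with
            | Nat.succ l'' =>
              rw [pv_ext_iff t p i l'' hi (by omega)] at hs
              exact absurd hs.2 (h5 l'' (by omega) (by omega) hs.1)
          · rw [pvE_succ_no_occ t p i hi hocc]; exact hres
          · omega
      · rw [if_neg heq]
        by_cases hj0 : j = 0
        · rw [if_neg (by simp [hj0])]
          have hocc : ¬ p <:+ t.take (i+1) := by
            intro hocc
            have hps : p.take (p.length - 1 + 1) <:+ t.take (i+1) := by
              rw [Nat.sub_add_cancel hm1, List.take_length]; exact hocc
            rw [pv_ext_iff t p i (p.length - 1) hi (by omega)] at hps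
            rcases Nat.eq_zero_or_pos (p.length - 1) with h0 | hpos
            · rw [h0, ← hj0] at hps
              exact heq hps.2
            · exact h5 (p.length - 1) (by omega) (by omega) hps.1 hps.2
          apply ih (i+1) 0 _ ?_ ?_ ?_
          · refine ⟨by omega, by omega, by omega, by simp, ?_⟩
            intro l hl1 hl2 hs
            match l with
            | Nat.succ l'' =>
              rw [pv_ext_iff t p i l'' hi (by omega)] at hs
              rcases Nat.eq_zero_or_pos l'' with h0 | hpos
              · rw [h0, ← hj0] at hs
                exact absurd hs.2 heq
              · exact absurd hs.2 (h5 l'' (by omega) (by omega) hs.1)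
          · rw [pvE_succ_no_occ t p i hi hocc]; exact hres
          · omega
        · rw [if_pos hj0]
          have hb := hlps (j - 1) (by omega)
          rw [Nat.sub_add_cancel (by omega)] at hb
          obtain ⟨hb1, hb2, hb3⟩ := hb
          apply ih i (lps.getD (j-1) 0) _ ?_ hres ?_
          · refine ⟨h1, by omega, by omega, hb2.trans h4, ?_⟩
            intro l hl1 hl2 hs
            by_cases hlg : j < l
            · exact h5 l hlg hl2 hs
            · by_cases hle : l = j
              · rw [hle]; exact heq
              · have hss : p.take l <:+ p.take j := by
                  apply List.suffix_of_suffix_length_le hs h4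
                  rw [List.length_take_of_le (by omega), List.length_take_of_le (by omega)]
                  omega
                exact absurd (hb3 l (by omega) hss) (by omega)
          · omega
    · rw [if_neg hi]
      have hieq : i = t.length := by omega
      rw [hres, hieq]

-- ---- the flattening folds in closed form ----
theorem pvFoldInner_A (r : Int) : ∀ (row : List Int) (s : Int) (acc : List Int × List (Int × Int)),
    (PySem.List.enumerate row s).foldl (fun acc2 q => (acc2.1 ++ [q.2], acc2.2 ++ [(r, q.1)])) acc
      = (acc.1 ++ row, acc.2 ++ (PySem.List.enumerate row s).map (fun q => (r, q.1))) := by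
  intro row
  induction row with
  | nil => intro s acc; simp [PySem.List.enumerate]
  | cons x xs ih =>
    intro s acc
    rw [PySem.List.enumerate_cons]
    simp only [List.foldl_cons, List.map_cons]
    rw [ih]
    simp

theorem pvFoldA : ∀ (text : List (List Int)) (s : Int) (acc : List Int × List (Int × Int)),
    (PySem.List.enumerate text s).foldl (fun acc p =>
      (PySem.List.enumerate p.2).foldl (fun acc2 q => (acc2.1 ++ [q.2], acc2.2 ++ [(p.1, q.1)])) acc) acc
      = (acc.1 ++ text.flatMap id,
         acc.2 ++ (PySem.List.enumerate text s).flatMap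
           (fun p => (PySem.List.enumerate p.2).map (fun q => (p.1, q.1)))) := by
  intro text
  induction text with
  | nil => intro s acc; simp [PySem.List.enumerate]
  | cons row rows ih =>
    intro s acc
    rw [PySem.List.enumerate_cons]
    simp only [List.foldl_cons, List.flatMap_cons]
    rw [pvFoldInner_A s row 0 acc, ih]
    simp [List.append_assoc]

theorem pvFoldInner_B (r : Int) : ∀ (row : List Int) (s : Int) (acc : List Int × List (List Int)),
    (PySem.List.enumerate row s).foldl (fun acc2 q => (acc2.1 ++ [q.2], acc2.2 ++ [[r, q.1]])) acc
      = (acc.1 ++ row, acc.2 ++ (PySem.List.enumerate row s).map (fun q => [r, q.1])) := by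
  intro row
  induction row with
  | nil => intro s acc; simp [PySem.List.enumerate]
  | cons x xs ih =>
    intro s acc
    rw [PySem.List.enumerate_cons]
    simp only [List.foldl_cons, List.map_cons]
    rw [ih]
    simp

theorem pvFoldB : ∀ (text : List (List Int)) (s : Int) (acc : List Int × List (List Int)),
    (PySem.List.enumerate text s).foldl (fun acc p =>
      (PySem.List.enumerate p.2).foldl (fun acc2 q => (acc2.1 ++ [q.2], acc2.2 ++ [[p.1, q.1]])) acc) acc
      = (acc.1 ++ text.flatMap id,
         acc.2 ++ (PySem.List.enumerate text s).flatMap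
           (fun p => (PySem.List.enumerate p.2).map (fun q => [p.1, q.1]))) := by
  intro text
  induction text with
  | nil => intro s acc; simp [PySem.List.enumerate]
  | cons row rows ih =>
    intro s acc
    rw [PySem.List.enumerate_cons]
    simp only [List.foldl_cons, List.flatMap_cons]
    rw [pvFoldInner_B s row 0 acc, ih]
    simp [List.append_assoc]

-- B's position list is the pairwise index map rendered as two-element lists
theorem pvPosEq (text : List (List Int)) (s : Int) :
    (PySem.List.enumerate text s).flatMap (fun p => (PySem.List.enumerate p.2).map (fun q => [p.1, q.1]))
      = ((PySem.List.enumerate text s).flatMap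
          (fun p => (PySem.List.enumerate p.2).map (fun q => (p.1, q.1)))).map
        (fun rc => [rc.1, rc.2]) := by
  simp [List.map_flatMap, List.map_map, Function.comp_def]

theorem pvIMapLen : ∀ (text : List (List Int)) (s : Int),
    ((PySem.List.enumerate text s).flatMap
      (fun p => (PySem.List.enumerate p.2).map (fun q => (p.1, q.1)))).length
      = (text.flatMap id).length := by
  intro text
  induction text with
  | nil => intro s; simp [PySem.List.enumerate]
  | cons row rows ih =>
    intro s
    rw [PySem.List.enumerate_cons]
    simp [PySem.List.length_enumerate, ih]

-- ---- the two ports in closed form ----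
theorem pvA_eq (text : List (List Int)) (p : List Int) (hp : p ≠ []) :
    kmp_search_2d text p
      = (pvE (text.flatMap id) p (text.flatMap id).length).map
          (pvG ((PySem.List.enumerate text 0).flatMap
            (fun pr => (PySem.List.enumerate pr.2).map (fun q => (pr.1, q.1))))) := by
  unfold kmp_search_2d
  rw [if_neg hp]
  simp only [pvFoldA, List.nil_append]
  apply pvKmpLoop_spec _ _ _ _ hp (compute_lps_spec p hp)
  · refine ⟨Nat.zero_le _, List.length_pos_iff.mpr hp, le_refl 0, by simp, ?_⟩
    intro l hl1 hl2 hs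
    rw [List.take_zero, List.suffix_nil] at hs
    have := congrArg List.length hs
    rw [List.length_take_of_le (by omega)] at this
    simp at this
    omega
  · rw [pvE_zero _ _ hp]
    simp
  · omega

theorem pvB_eq (text : List (List Int)) (p : List Int) (hp : p ≠ []) :
    kmp_search_2d_alt text p
      = (pvE (text.flatMap id) p (text.flatMap id).length).map
          (pvG ((PySem.List.enumerate text 0).flatMap
            (fun pr => (PySem.List.enumerate pr.2).map (fun q => (pr.1, q.1))))) := by
  unfold kmp_search_2d_alt
  rw [if_neg hp]
  simp only [pvFoldB, List.nil_append]
  by_cases hmn : p.length ≤ (text.flatMap id).length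
  · have hcast : ((text.flatMap id).length : Int) - (p.length : Int) + 1
        = (((text.flatMap id).length + 1 - p.length : Nat) : Int) := by omega
    rw [hcast, PySem.List.pyRange_zero_natCast, List.filter_map, List.map_map]
    have hfil : ((fun s => PySem.List.slice (text.flatMap id) (some s) (some (s + (p.length : Int))) == p)
          ∘ fun k : Nat => (k : Int))
        = (fun k : Nat => (List.take p.length (List.drop k (text.flatMap id)) == p)) := by
      funext k
      simp [Function.comp, PySem.List.slice_natCast_add]
    rw [hfil, pvE]
    apply List.map_congr_left
    intro k hk
    rw [List.mem_filter] at hk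
    have hcond : List.take p.length (List.drop k (text.flatMap id)) = p := by
      have := hk.2
      rwa [beq_iff_eq] at this
    have hkn : k < (text.flatMap id).length := by
      by_contra hge
      rw [List.drop_eq_nil_iff.mpr (by omega)] at hcond
      exact hp (by rw [← hcond]; simp)
    simp only [Function.comp_apply, PySem.List.pyGetD_natCast, pvPosEq, pvG]
    have hklen : k < ((PySem.List.enumerate text 0).flatMap
        (fun pr => (PySem.List.enumerate pr.2).map (fun q => (pr.1, q.1)))).length := by
      rw [pvIMapLen]; omega
    rw [List.getD_eq_getElem _ _ (by simpa using hklen), List.getElem_map,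
      List.getD_eq_getElem _ _ hklen]
  · have hneg : ((text.flatMap id).length : Int) - (p.length : Int) + 1 ≤ 0 := by
      omega
    have h0 : (text.flatMap id).length + 1 - p.length = 0 := by omega
    rw [PySem.List.pyRange_one_eq_nil hneg, pvE, h0]
    simp

theorem kmp_search_2d_spec : Claim_equal_kmp_search_2d := by
  intro text pattern _
  unfold Spec_kmp_search_2d
  by_cases hp : pattern = []
  · simp [kmp_search_2d, kmp_search_2d_alt, hp]
  · rw [pvA_eq text pattern hp, pvB_eq text pattern hp]
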